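-- pv_equiv track=rewrite | github.com/SAG145/Project-Euler | PEP834 - Add and Divide .py | shortened_pf
-- ===== SOURCE A (Python) =====
-- def shortened_pf(pf):
--     spf = []
--     i = 1
--     p = pf[0]
--     pp = 1
--     while i < len(pf) + 1:
--         if i == len(pf) or pf[i] != p:
--             spf.append((p,pp))
--             if i != len(pf):
--                 p = pf[i]
--                 pp = 1
--         else:
--             pp += 1
--         i += 1
--     return spf
-- ===== SOURCE B (Python) =====
-- def shortened_pf(pf):
--     n = len(pf)
--     starts = [i for i in range(n) if i == 0 or pf[i] != pf[i - 1]]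
--     return [(pf[s], e - s) for s, e in zip(starts, starts[1:] + [n])]
-- ===== Notes on version B (the rewrite author's own statement) =====
-- stated objective: alternative
-- what changed: Replaces A's stateful single pass (index with peek-ahead, current value, running counter, append at boundaries) by two stateless staged passes: a comprehension collecting run-start indices, then zipping consecutive starts to emit (value, end - start) pairs.
-- crash fix: On the empty list A raises IndexError when it reads the first element; B returns an empty list. — e.g. on shortened_pf([]): A raises IndexError, B returns []
import Mathlib
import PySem

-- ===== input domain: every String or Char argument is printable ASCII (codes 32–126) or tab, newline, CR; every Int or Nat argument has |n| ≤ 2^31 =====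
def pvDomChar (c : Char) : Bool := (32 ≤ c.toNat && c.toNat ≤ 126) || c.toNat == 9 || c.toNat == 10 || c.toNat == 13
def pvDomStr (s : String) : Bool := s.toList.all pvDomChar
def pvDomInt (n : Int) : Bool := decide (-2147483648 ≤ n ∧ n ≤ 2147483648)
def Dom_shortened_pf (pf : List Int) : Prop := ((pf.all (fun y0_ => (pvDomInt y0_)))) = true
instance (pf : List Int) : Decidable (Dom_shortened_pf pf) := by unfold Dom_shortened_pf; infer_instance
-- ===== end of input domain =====

-- B replaces A's stateful single pass (index, current value, running counter) by two
-- stateless staged passes: collect the run-start indices, then zip consecutive starts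
-- into (value, end - start) pairs (objective: alternative).

-- ===== PORT A =====
-- the while loop of A: state (spf, p, pp), index i running from 1 to len(pf)
def pvLoopA (pf : List Int) (i : Nat) (p pp : Int) (spf : List (Int × Int)) :
    List (Int × Int) :=
  if _h : i < pf.length + 1 then
    if i = pf.length ∨ PySem.List.pyGetD pf (i : Int) 0 ≠ p then
      if i ≠ pf.length then
        pvLoopA pf (i + 1) (PySem.List.pyGetD pf (i : Int) 0) 1 (spf ++ [(p, pp)])
      else
        pvLoopA pf (i + 1) p pp (spf ++ [(p, pp)])
    else
      pvLoopA pf (i + 1) p (pp + 1) spf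
  else spf
termination_by pf.length + 1 - i

def shortened_pf (pf : List Int) : List (Int × Int) :=
  match PySem.List.pyGet? pf 0 with   -- A reads the first element; none = IndexError, excluded by Pre_
  | none => []
  | some p => pvLoopA pf 1 p 1 []

-- ===== PORT B =====
-- starts = [i for i in range(n) if i == 0 or pf[i] != pf[i-1]]
def pvStarts (pf : List Int) : List Nat :=
  (List.range pf.length).filter
    (fun i => i == 0 || PySem.List.pyGetD pf (i : Int) 0 != PySem.List.pyGetD pf ((i : Int) - 1) 0)

-- [(pf[s], e - s) for s, e in zip(starts, starts[1:] + [n])]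
def shortened_pf_alt (pf : List Int) : List (Int × Int) :=
  let n := pf.length
  let starts := pvStarts pf
  (starts.zip (starts.drop 1 ++ [n])).map
    (fun se => (PySem.List.pyGetD pf ((se.1 : Nat) : Int) 0, ((se.2 : Int) - (se.1 : Int))))

-- ===== PRECONDITION & SPEC =====
-- Pre_ excludes only the empty list, on which A raises IndexError reading the first element.
def Pre_shortened_pf (pf : List Int) : Prop := pf ≠ []
instance (pf : List Int) : Decidable (Pre_shortened_pf pf) := by
  unfold Pre_shortened_pf; infer_instance
def pvWitness_shortened_pf : List Int := ([2, 2, 3])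

-- On the empty list A raises IndexError reading the first element; B returns an empty list.
def Raises_shortened_pf (pf : List Int) : Prop := pf = []
instance (pf : List Int) : Decidable (Raises_shortened_pf pf) := by
  unfold Raises_shortened_pf; infer_instance
def pvRaiseWitness_shortened_pf : List Int := ([])
def pvRaiseWitnessOut_shortened_pf : List (Int × Int) := []

def Spec_shortened_pf (pf : List Int) (out : List (Int × Int)) : Prop :=
  out = shortened_pf_alt pf
instance (pf : List Int) (out : List (Int × Int)) : Decidable (Spec_shortened_pf pf out) := by
  unfold Spec_shortened_pf; infer_instance

-- ===== CLAIM =====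
def Claim_equal_shortened_pf : Prop :=
  ∀ (pf : List Int), Dom_shortened_pf pf → Pre_shortened_pf pf →
    Spec_shortened_pf pf (shortened_pf pf)
def Claim_raises_shortened_pf : Prop :=
  (∀ (pf : List Int), Dom_shortened_pf pf → Raises_shortened_pf pf → ¬ Pre_shortened_pf pf) ∧
  (Dom_shortened_pf (pvRaiseWitness_shortened_pf) ∧
    Raises_shortened_pf (pvRaiseWitness_shortened_pf) ∧
    shortened_pf_alt (pvRaiseWitness_shortened_pf) = pvRaiseWitnessOut_shortened_pf)

-- ===== LEMMAS AND PROOFS =====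
-- reference run-length encoding: pvRle = remaining suffix with current run (p, pp)
def pvRle : List Int → Int → Int → List (Int × Int)
  | [], p, pp => [(p, pp)]
  | x :: xs, p, pp => if x = p then pvRle xs p (pp + 1) else (p, pp) :: pvRle xs x 1

def pvRleTop : List Int → List (Int × Int)
  | [] => []
  | x :: xs => pvRle xs x 1

theorem pvLoopA_eq_rle (pf : List Int) (i : Nat) (p pp : Int) (spf : List (Int × Int))
    (hi : i ≤ pf.length) :
    pvLoopA pf i p pp spf = spf ++ pvRle (pf.drop i) p pp := by
  induction hn : pf.length - i generalizing i p pp spf with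
  | zero =>
    have hi' : i = pf.length := by omega
    subst hi'
    rw [pvLoopA, dif_pos (by omega : pf.length < pf.length + 1),
      if_pos (Or.inl rfl), if_neg (by simp : ¬ (pf.length ≠ pf.length))]
    rw [pvLoopA, dif_neg (by omega : ¬ (pf.length + 1 < pf.length + 1))]
    simp [pvRle]
  | succ n ih =>
    have hlt : i < pf.length := by omega
    have hget : PySem.List.pyGetD pf (i : Int) 0 = pf[i] := by
      simp [PySem.List.pyGetD_natCast, List.getD_eq_getElem?_getD, List.getElem?_eq_getElem hlt]
    have hdrop : pf.drop i = pf[i] :: pf.drop (i + 1) := List.drop_eq_getElem_cons hlt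
    rw [pvLoopA, dif_pos (by omega : i < pf.length + 1)]
    by_cases hx : pf[i] = p
    · have hc : ¬ (i = pf.length ∨ PySem.List.pyGetD pf (i : Int) 0 ≠ p) := by
        simp [hget, hx]; omega
      rw [if_neg hc, ih (i + 1) p (pp + 1) spf (by omega) (by omega), hdrop]
      simp [pvRle, hx]
    · have hc : i = pf.length ∨ PySem.List.pyGetD pf (i : Int) 0 ≠ p := by
        right; rw [hget]; exact hx
      rw [if_pos hc, if_pos (by omega : i ≠ pf.length), hget,
        ih (i + 1) pf[i] 1 (spf ++ [(p, pp)]) (by omega) (by omega), hdrop]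
      simp [pvRle, hx]

-- splitting pvRle at the end of the current run
theorem pvRle_split (xs : List Int) (x pp : Int) :
    pvRle xs x pp =
      (x, pp + ((xs.takeWhile (· == x)).length : Int)) :: pvRleTop (xs.dropWhile (· == x)) := by
  induction xs generalizing pp with
  | nil => simp [pvRle, pvRleTop]
  | cons y ys ih =>
    by_cases hy : y = x
    · subst hy
      simp only [pvRle, List.takeWhile_cons, List.dropWhile_cons]
      simp [ih (pp + 1)]
      ring_nf
    · simp [pvRle, hy, pvRleTop]


-- elements of pvStarts are in-range indices
theorem pvStarts_lt (pf : List Int) (s : Nat) (hs : s ∈ pvStarts pf) : s < pf.length := by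
  unfold pvStarts at hs
  exact List.mem_range.mp (List.mem_filter.mp hs).1

-- pf[j] = x throughout the leading run (j ≤ length of the run of x)
theorem pvVal_run (x : Int) (xs : List Int) (j : Nat)
    (hj : j ≤ (xs.takeWhile (· == x)).length) :
    (x :: xs).getD j 0 = x := by
  match j with
  | 0 => rfl
  | j' + 1 =>
    have hj' : j' < (xs.takeWhile (· == x)).length := by omega
    have hpre : xs[j']? = (xs.takeWhile (· == x))[j']? := by
      obtain ⟨t, ht⟩ := List.takeWhile_prefix (l := xs) (· == x)
      conv_lhs => rw [← ht]
      rw [List.getElem?_append_left hj']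
    have hmem0 : (xs.takeWhile (· == x))[j'] ∈ xs.takeWhile (· == x) := List.getElem_mem hj'
    have hmem := List.mem_takeWhile_imp hmem0
    have : xs.getD j' 0 = x := by
      rw [List.getD_eq_getElem?_getD, hpre, List.getElem?_eq_getElem hj']
      simpa using hmem
    simpa [List.getD_cons_succ] using this

-- indexing pf past the leading run lands in the dropWhile suffix
theorem pvVal_suffix (x : Int) (xs : List Int) (j : Nat)
    (_hj : j < (xs.dropWhile (· == x)).length) :
    (x :: xs).getD ((xs.takeWhile (· == x)).length + 1 + j) 0 =
      (xs.dropWhile (· == x)).getD j 0 := by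
  have hxs : xs.takeWhile (· == x) ++ xs.dropWhile (· == x) = xs :=
    List.takeWhile_append_dropWhile
  have happ : (xs.takeWhile (· == x) ++ xs.dropWhile (· == x))[(xs.takeWhile (· == x)).length + j]? =
      (xs.dropWhile (· == x))[j]? := by
    rw [List.getElem?_append_right (by omega)]
    congr 1
    omega
  rw [hxs] at happ
  rw [List.getD_eq_getElem?_getD, List.getD_eq_getElem?_getD,
    show (xs.takeWhile (· == x)).length + 1 + j = ((xs.takeWhile (· == x)).length + j) + 1 by omega]
  simp only [List.getElem?_cons_succ]
  rw [happ]

theorem pvStarts_shift (x : Int) (xs : List Int) :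
    pvStarts (x :: xs) =
      0 :: (pvStarts (xs.dropWhile (· == x))).map
        (fun s => ((xs.takeWhile (· == x)).length + 1) + s) := by
  have hlen : (xs.takeWhile (· == x)).length + (xs.dropWhile (· == x)).length = xs.length := by
    have h := congrArg List.length (List.takeWhile_append_dropWhile (p := (· == x)) (l := xs))
    rw [List.length_append] at h
    exact h
  set t := (xs.takeWhile (· == x)).length with ht
  set suf := xs.dropWhile (· == x) with hsuf
  set m := suf.length with hm
  have hn : (x :: xs).length = (t + 1) + m := by simp; omega
  unfold pvStarts
  rw [hn, List.range_add, List.filter_append]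
  have hpart1 : (List.range (t + 1)).filter
      (fun (i : Nat) => i == 0 || PySem.List.pyGetD (x :: xs) (i : Int) 0 != PySem.List.pyGetD (x :: xs) ((i : Int) - 1) 0) = [0] := by
    rw [List.range_succ_eq_map, List.filter_cons_of_pos (by simp)]
    have : ((List.range t).map Nat.succ).filter
        (fun (i : Nat) => i == 0 || PySem.List.pyGetD (x :: xs) (i : Int) 0 != PySem.List.pyGetD (x :: xs) ((i : Int) - 1) 0) = [] := by
      rw [List.filter_map, List.filter_eq_nil_iff.mpr, List.map_nil]
      intro j hj
      have hjt : j < t := List.mem_range.mp hj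
      simp only [Function.comp]
      have h1 : PySem.List.pyGetD (x :: xs) ((Nat.succ j : Nat) : Int) 0 = x := by
        rw [PySem.List.pyGetD_natCast]
        exact pvVal_run x xs (j + 1) (by omega)
      have h2 : PySem.List.pyGetD (x :: xs) (((Nat.succ j : Nat) : Int) - 1) 0 = x := by
        rw [show ((Nat.succ j : Nat) : Int) - 1 = ((j : Nat) : Int) by push_cast; ring,
          PySem.List.pyGetD_natCast]
        exact pvVal_run x xs j (by omega)
      rw [h1, h2]
      simp
    rw [this]
  rw [hpart1]
  have hpart2 : ((List.range m).map (fun s => (t + 1) + s)).filter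
      (fun (i : Nat) => i == 0 || PySem.List.pyGetD (x :: xs) (i : Int) 0 != PySem.List.pyGetD (x :: xs) ((i : Int) - 1) 0) =
      (pvStarts suf).map (fun s => (t + 1) + s) := by
    rw [List.filter_map]
    unfold pvStarts
    rw [← hm]
    congr 1
    apply List.filter_congr
    intro j hjr
    have hjm : j < m := List.mem_range.mp hjr
    simp only [Function.comp]
    cases j with
    | zero =>
      have hsne : suf ≠ [] := by rw [← List.length_pos_iff]; omega
      have hhead : (suf.head hsne == x) = false := by
        have := List.head_dropWhile_not (· == x) (l := xs) (by rw [← hsuf]; exact hsne)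
        simpa [← hsuf] using this
      have h1 : PySem.List.pyGetD (x :: xs) (((t + 1) + 0 : Nat) : Int) 0 = suf.getD 0 0 := by
        rw [PySem.List.pyGetD_natCast]
        exact pvVal_suffix x xs 0 (by omega)
      have h2 : PySem.List.pyGetD (x :: xs) ((((t + 1) + 0 : Nat) : Int) - 1) 0 = x := by
        rw [show ((((t + 1) + 0 : Nat)) : Int) - 1 = ((t : Nat) : Int) by push_cast; ring,
          PySem.List.pyGetD_natCast]
        exact pvVal_run x xs t (by omega)
      have hgd : suf.getD 0 0 = suf.head hsne := by
        rw [List.getD_eq_getElem?_getD, List.getElem?_eq_getElem (by omega)]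
        simp [List.getElem_zero_eq_head]
      have hne : suf.getD 0 0 ≠ x := by
        rw [hgd]; intro h; rw [h] at hhead; simp at hhead
      rw [h1, h2]
      have hne' : suf[0]?.getD 0 ≠ x := by rw [← List.getD_eq_getElem?_getD]; exact hne
      simp [hne']
    | succ j' =>
      have hjs : j' + 1 < (xs.dropWhile (· == x)).length := by rw [← hsuf]; exact hjm
      have h1 : PySem.List.pyGetD (x :: xs) (((t + 1) + (j' + 1) : Nat) : Int) 0 = suf.getD (j' + 1) 0 := by
        rw [PySem.List.pyGetD_natCast]
        exact pvVal_suffix x xs (j' + 1) hjs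
      have h2 : PySem.List.pyGetD (x :: xs) ((((t + 1) + (j' + 1) : Nat) : Int) - 1) 0 = suf.getD j' 0 := by
        rw [show ((((t + 1) + (j' + 1) : Nat)) : Int) - 1 = (((t + 1) + j' : Nat) : Int) by push_cast; ring,
          PySem.List.pyGetD_natCast]
        exact pvVal_suffix x xs j' (by omega)
      have h3 : PySem.List.pyGetD suf ((j' + 1 : Nat) : Int) 0 = suf.getD (j' + 1) 0 := by
        rw [PySem.List.pyGetD_natCast]
      have h4 : PySem.List.pyGetD suf (((j' + 1 : Nat) : Int) - 1) 0 = suf.getD j' 0 := by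
        rw [show (((j' + 1 : Nat)) : Int) - 1 = ((j' : Nat) : Int) by push_cast; ring,
          PySem.List.pyGetD_natCast]
      rw [h1, h2, h3, h4]
      simp
  rw [hpart2]
  rfl

theorem alt_eq_rleTop_aux (N : Nat) (pf : List Int) (hlen : pf.length ≤ N) :
    shortened_pf_alt pf = pvRleTop pf := by
  induction N generalizing pf with
  | zero =>
    have : pf = [] := by
      cases pf with
      | nil => rfl
      | cons a l => simp at hlen
    subst this
    rfl
  | succ N ih =>
    match pf with
    | [] => rfl
    | x :: xs =>
      have hlsum : (xs.takeWhile (· == x)).length + (xs.dropWhile (· == x)).length = xs.length := by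
        have h := congrArg List.length (List.takeWhile_append_dropWhile (p := (· == x)) (l := xs))
        rw [List.length_append] at h
        exact h
      set t := (xs.takeWhile (· == x)).length with ht
      set suf := xs.dropWhile (· == x) with hsuf
      have hstarts := pvStarts_shift x xs
      rw [← hsuf, ← ht] at hstarts
      have hrle : pvRleTop (x :: xs) = (x, 1 + (t : Int)) :: pvRleTop suf := by
        show pvRle xs x 1 = _
        rw [pvRle_split]
      have hclosed : shortened_pf_alt (x :: xs) =
          ((pvStarts (x :: xs)).zip ((pvStarts (x :: xs)).drop 1 ++ [(x :: xs).length])).map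
            (fun se => (PySem.List.pyGetD (x :: xs) ((se.1 : Nat) : Int) 0,
              ((se.2 : Int) - (se.1 : Int)))) := rfl
      rw [hclosed, hstarts, hrle,
        show (x :: xs).length = (t + 1) + suf.length by simp; omega,
        List.drop_succ_cons, List.drop_zero]
      cases hP : pvStarts suf with
      | nil =>
        have hm0 : suf.length = 0 := by
          by_contra h
          have h0 : (0 : Nat) ∈ pvStarts suf := by
            unfold pvStarts
            exact List.mem_filter.mpr ⟨List.mem_range.mpr (by omega), by simp⟩
          rw [hP] at h0
          simp at h0
        have hsufnil : suf = [] := List.length_eq_zero_iff.mp hm0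
        rw [hsufnil]
        simp [pvRleTop]
        ring
      | cons s0 S' =>
        have hsufne : suf ≠ [] := by
          intro h
          rw [h] at hP
          simp [pvStarts] at hP
        obtain ⟨y, ys, hyy⟩ := List.exists_cons_of_ne_nil hsufne
        have hs0 : s0 = 0 := by
          have h2 := pvStarts_shift y ys
          rw [hyy, h2] at hP
          exact (List.cons_eq_cons.mp hP).1.symm
        subst hs0
        -- second zip argument as a single map
        have happ : ((0 :: S').map (fun s => (t + 1) + s)) ++ [(t + 1) + suf.length] =
            ((0 :: S') ++ [suf.length]).map (fun s => (t + 1) + s) := by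
          rw [List.map_append]
          rfl
        rw [happ]
        -- peel the first pair of the zip, then turn the tail into a mapped zip
        have hzip : (0 :: (0 :: S').map (fun s => (t + 1) + s)).zip
              (((0 :: S') ++ [suf.length]).map (fun s => (t + 1) + s)) =
            (0, (t + 1) + 0) ::
              ((0 :: S').zip (S' ++ [suf.length])).map
                (Prod.map (fun s => (t + 1) + s) (fun s => (t + 1) + s)) := by
          show (0 :: (0 :: S').map (fun s => (t + 1) + s)).zip
              (((t + 1) + 0) :: (S' ++ [suf.length]).map (fun s => (t + 1) + s)) = _
          rw [List.zip_cons_cons, List.zip_map]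
        rw [hzip, List.map_cons, List.map_map]
        -- head pair
        have hhead : (PySem.List.pyGetD (x :: xs) ((((0, (t + 1) + 0).1 : Nat)) : Int) 0,
            ((((0, (t + 1) + 0).2 : Nat) : Int) - (((0, (t + 1) + 0).1 : Nat) : Int))) =
            (x, 1 + (t : Int)) := by
          simp [PySem.List.pyGetD_zero_cons]
          ring
        -- tail: elementwise equal to shortened_pf_alt suf
        have htail :
            ((0 :: S').zip (S' ++ [suf.length])).map
              ((fun (se : Nat × Nat) => (PySem.List.pyGetD (x :: xs) ((se.1 : Nat) : Int) 0,
                ((se.2 : Int) - (se.1 : Int)))) ∘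
                Prod.map (fun (s : Nat) => (t + 1) + s) (fun (s : Nat) => (t + 1) + s)) =
            ((0 :: S').zip (S' ++ [suf.length])).map
              (fun (se : Nat × Nat) => (PySem.List.pyGetD suf ((se.1 : Nat) : Int) 0,
                ((se.2 : Int) - (se.1 : Int)))) := by
          apply List.map_congr_left
          intro se hse
          have hse1 : se.1 ∈ pvStarts suf := by
            rw [hP]
            exact (List.of_mem_zip hse).1
          have hse1lt : se.1 < (xs.dropWhile (· == x)).length := by
            rw [← hsuf]
            exact pvStarts_lt suf se.1 hse1
          simp only [Function.comp, Prod.map]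
          have hfst : PySem.List.pyGetD (x :: xs) (((t + 1) + se.1 : Nat) : Int) 0 =
              PySem.List.pyGetD suf ((se.1 : Nat) : Int) 0 := by
            rw [PySem.List.pyGetD_natCast, PySem.List.pyGetD_natCast, hsuf, ht]
            exact pvVal_suffix x xs se.1 hse1lt
          rw [hfst]
          congr 1
          push_cast
          ring
        rw [hhead, htail]
        have halt : shortened_pf_alt suf =
            ((0 :: S').zip (S' ++ [suf.length])).map
              (fun se => (PySem.List.pyGetD suf ((se.1 : Nat) : Int) 0,
                ((se.2 : Int) - (se.1 : Int)))) := by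
          show ((pvStarts suf).zip ((pvStarts suf).drop 1 ++ [suf.length])).map _ = _
          rw [hP, List.drop_succ_cons, List.drop_zero]
        rw [← halt, ih suf (by simp at hlen; omega)]

theorem alt_eq_rleTop (pf : List Int) : shortened_pf_alt pf = pvRleTop pf :=
  alt_eq_rleTop_aux pf.length pf le_rfl

-- ===== VERDICT =====
theorem shortened_pf_spec : Claim_equal_shortened_pf := by
  intro pf _ hpre
  unfold Spec_shortened_pf
  rw [alt_eq_rleTop]
  match pf, hpre with
  | x :: xs, _ =>
    rw [shortened_pf]
    simp only [PySem.List.pyGet?_zero_cons]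
    rw [pvLoopA_eq_rle (x :: xs) 1 x 1 [] (by simp)]
    simp [pvRleTop]

@[simp]
theorem shortened_pf_raises : Claim_raises_shortened_pf := by
  unfold Claim_raises_shortened_pf
  exact ⟨fun pf _ h hp => hp h, by decide⟩
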